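-- pv_equiv track=rewrite | github.com/c610/tmp | modus_operandi/plugins/basic_code_review.py | __prepare_unserialize_definitions
-- ===== SOURCE A (Python) =====
-- def __prepare_unserialize_definitions(methods):
--     unserialize_dict = {}
--
--     functions = [
--         'unserialize',
--         'unserialize '
--     ]
--     for m in methods:
--         for f in functions:
--             tag = "SERIALIZATION:%s-%s" % (f.rstrip(), m)
--             unserialize_dict[tag] = (f + "(.*?)\\$_" + m + "\['(.*?)'\]", "possible umsafe unserialize")
--
--     return unserialize_dict
-- ===== SOURCE B (Python) =====
-- def __prepare_unserialize_definitions(methods):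
--     # A's inner loop writes both variants to the same rstripped key, so only
--     # the trailing-space variant survives; duplicate methods also collide on
--     # one key with an identical value.  So: dedupe methods first (keeping
--     # first occurrences), then build the dict from the mapped pairs directly.
--     uniq = dict.fromkeys(methods)
--     return dict(
--         ("SERIALIZATION:unserialize-" + m,
--          ("unserialize (.*?)\\$_" + m + "\['(.*?)'\]",
--           "possible umsafe unserialize"))
--         for m in uniq
--     )
-- ===== Notes on version B (the rewrite author's own statement) =====
-- stated objective: simpler
-- what changed: A's two-element inner loop over the function-name variants always writes the same rstripped key, so only the trailing-space variant survives; B eliminates that inner loop and the insert-with-overwrite dict building entirely: it dedupes the methods once (dict.fromkeys) and constructs the dict directly from the mapped key/value pairs, which are then all distinct.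
import Mathlib
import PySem

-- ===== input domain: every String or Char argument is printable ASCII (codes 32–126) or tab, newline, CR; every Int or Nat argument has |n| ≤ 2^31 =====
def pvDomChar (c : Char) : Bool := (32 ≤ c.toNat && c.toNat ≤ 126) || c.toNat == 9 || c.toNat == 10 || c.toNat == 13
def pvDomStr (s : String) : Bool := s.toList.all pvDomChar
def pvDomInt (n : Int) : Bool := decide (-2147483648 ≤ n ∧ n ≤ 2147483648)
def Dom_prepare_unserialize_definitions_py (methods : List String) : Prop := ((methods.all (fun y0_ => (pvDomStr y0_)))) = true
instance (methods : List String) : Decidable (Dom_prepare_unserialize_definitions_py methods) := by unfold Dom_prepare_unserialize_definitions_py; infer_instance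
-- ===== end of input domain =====

-- B drops A's redundant two-variant inner loop (whose rstripped tag always overwrites the same key) and instead dedupes the methods once and builds the dict from the mapped key/value pairs: simpler, same output.


-- ===== PORT A =====
def prepare_unserialize_definitions_py (methods : List String) : List (String × String × String) :=
  let functions : List String := ["unserialize", "unserialize "]
  (methods.foldl (fun d m =>
      functions.foldl (fun d f =>
          d.insert ("SERIALIZATION:" ++ PySem.Str.rstrip f ++ "-" ++ m)
            (f ++ "(.*?)\\$_" ++ m ++ "\\['(.*?)'\\]", "possible umsafe unserialize")) d)
    PySem.Dict.empty).items

-- ===== PORT B =====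
def prepare_unserialize_definitions_py_alt (methods : List String) : List (String × String × String) :=
  (PySem.Dict.ofList ((PySem.List.dedup methods).map (fun m =>
      ("SERIALIZATION:unserialize-" ++ m,
       ("unserialize (.*?)\\$_" ++ m ++ "\\['(.*?)'\\]", "possible umsafe unserialize"))))).items

-- ===== PRECONDITION & SPEC =====
def Spec_prepare_unserialize_definitions_py (methods : List String) (out : List (String × String × String)) : Prop := out = prepare_unserialize_definitions_py_alt methods
instance (methods : List String) (out : List (String × String × String)) : Decidable (Spec_prepare_unserialize_definitions_py methods out) := by unfold Spec_prepare_unserialize_definitions_py; infer_instance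

-- ===== CLAIM (what is proved, stated in full; the proofs are below) =====
def Claim_equal_prepare_unserialize_definitions_py : Prop := ∀ (methods : List String), Dom_prepare_unserialize_definitions_py methods → Spec_prepare_unserialize_definitions_py methods (prepare_unserialize_definitions_py methods)

-- ===== LEMMAS AND PROOFS =====

-- the (key, value) pair both programs associate with a method m
def pvKey (m : String) : String := "SERIALIZATION:unserialize-" ++ m
def pvVal (m : String) : String × String :=
  ("unserialize (.*?)\\$_" ++ m ++ "\\['(.*?)'\\]", "possible umsafe unserialize")

lemma pv_key_inj {a b : String} (h : pvKey a = pvKey b) : a = b := by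
  have h' : a.toList = b.toList := by
    have := congrArg String.toList h
    simpa [pvKey] using this
  exact String.toList_inj.mp h'

-- A's inner two-element loop collapses to a single insert of (pvKey m, pvVal m)
lemma pv_inner_collapse (d : PySem.Dict String (String × String)) (m : String) :
    (["unserialize", "unserialize "] : List String).foldl (fun d f =>
        d.insert ("SERIALIZATION:" ++ PySem.Str.rstrip f ++ "-" ++ m)
          (f ++ "(.*?)\\$_" ++ m ++ "\\['(.*?)'\\]", "possible umsafe unserialize")) d
    = d.insert (pvKey m) (pvVal m) := by
  have h1 : PySem.Str.rstrip "unserialize" = "unserialize" := by decide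
  have h2 : PySem.Str.rstrip "unserialize " = "unserialize" := by decide
  simp only [List.foldl_cons, List.foldl_nil, h1, h2]
  rw [PySem.Dict.insert_insert_self]
  rfl

lemma pv_contains_loop (l : List String) (m : String) :
    (l.foldl (fun d m => d.insert (pvKey m) (pvVal m)) PySem.Dict.empty).contains (pvKey m)
      = decide (m ∈ l) := by
  rw [PySem.Dict.contains_eq_decide_mem_keys,
      PySem.Dict.keys_foldl_insert_key l pvKey (fun _ x => pvVal x) PySem.Dict.empty]
  simp only [PySem.Dict.keys_empty, PySem.Set.update_nil_left]
  have hiff : pvKey m ∈ PySem.Set.ofList (l.map pvKey) ↔ m ∈ l := by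
    rw [PySem.Set.mem_ofList, List.mem_map]
    constructor
    · rintro ⟨x, hx, he⟩
      exact pv_key_inj he ▸ hx
    · intro h
      exact ⟨m, h, rfl⟩
  simp [hiff]

-- the collapsed outer loop produces exactly the pairs of the deduped methods
lemma pv_loop_items (l : List String) :
    (l.foldl (fun d m => d.insert (pvKey m) (pvVal m)) PySem.Dict.empty).items
      = (PySem.List.dedup l).map (fun m => (pvKey m, pvVal m)) := by
  induction l using List.reverseRecOn with
  | nil => rfl
  | append_singleton l m ih =>
    rw [List.foldl_append, List.foldl_cons, List.foldl_nil]
    by_cases hm : m ∈ l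
    · have hc : (l.foldl (fun d m => d.insert (pvKey m) (pvVal m)) PySem.Dict.empty).contains (pvKey m) = true := by
        rw [pv_contains_loop]; simpa using hm
      rw [PySem.Dict.items_insert_of_contains _ _ hc, ih]
      have hd : PySem.List.dedup (l ++ [m]) = PySem.List.dedup l := by
        simp only [PySem.List.dedup_eq_ofList, PySem.Set.ofList_append_singleton]
        show (if (PySem.Set.ofList l).contains m then PySem.Set.ofList l
              else PySem.Set.ofList l ++ [m]) = PySem.Set.ofList l
        have : (PySem.Set.ofList l).contains m = true := by
          simp [PySem.Set.mem_ofList, hm]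
        rw [this]; rfl
      rw [hd, List.map_map]
      apply List.map_congr_left
      intro x hx
      by_cases hxm : x = m
      · subst hxm; simp [pvVal]
      · have hne : ¬ ((pvKey x == pvKey m) = true) := by
          simp only [beq_iff_eq]
          exact fun h => hxm (pv_key_inj h)
        simp only [Function.comp]
        rw [if_neg hne]
    · have hc : (l.foldl (fun d m => d.insert (pvKey m) (pvVal m)) PySem.Dict.empty).contains (pvKey m) = false := by
        rw [pv_contains_loop]; simpa using hm
      rw [PySem.Dict.items_insert_of_not_contains _ _ hc, ih]
      have hd : PySem.List.dedup (l ++ [m]) = PySem.List.dedup l ++ [m] := by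
        simp only [PySem.List.dedup_eq_ofList, PySem.Set.ofList_append_singleton]
        show (if (PySem.Set.ofList l).contains m then PySem.Set.ofList l
              else PySem.Set.ofList l ++ [m]) = PySem.Set.ofList l ++ [m]
        have : (PySem.Set.ofList l).contains m = false := by
          simp [PySem.Set.mem_ofList, hm]
        rw [this]; rfl
      rw [hd, List.map_append, List.map_singleton]

-- a dict built from pairs with distinct fresh keys lists exactly those pairs
lemma pv_ofList_items (l : List String) :
    (PySem.Dict.ofList ((PySem.List.dedup l).map (fun m => (pvKey m, pvVal m)))).items
      = (PySem.List.dedup l).map (fun m => (pvKey m, pvVal m)) := by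
  have hfresh : ∀ a ∈ (PySem.List.dedup l).map (fun m => (pvKey m, pvVal m)),
      (PySem.Dict.empty : PySem.Dict String (String × String)).contains a.1 = false := by
    intro a _; simp [PySem.Dict.contains_empty]
  have hnd : (((PySem.List.dedup l).map (fun m => (pvKey m, pvVal m))).map Prod.fst).Nodup := by
    rw [List.map_map]
    exact (PySem.List.nodup_dedup l).map (fun a b h => pv_key_inj h)
  have := PySem.Dict.items_foldl_insert_fresh
      ((PySem.List.dedup l).map (fun m => (pvKey m, pvVal m)))
      Prod.fst Prod.snd PySem.Dict.empty hfresh hnd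
  simpa using this

-- ===== VERDICT (by name: the statement is the Claim_ definition above) =====
theorem prepare_unserialize_definitions_py_spec : Claim_equal_prepare_unserialize_definitions_py := by
  intro methods _
  show (methods.foldl (fun d m =>
      (["unserialize", "unserialize "] : List String).foldl (fun d f =>
          d.insert ("SERIALIZATION:" ++ PySem.Str.rstrip f ++ "-" ++ m)
            (f ++ "(.*?)\\$_" ++ m ++ "\\['(.*?)'\\]", "possible umsafe unserialize")) d)
      PySem.Dict.empty).items
    = (PySem.Dict.ofList ((PySem.List.dedup methods).map (fun m => (pvKey m, pvVal m)))).items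
  have houter : methods.foldl (fun d m =>
      (["unserialize", "unserialize "] : List String).foldl (fun d f =>
          d.insert ("SERIALIZATION:" ++ PySem.Str.rstrip f ++ "-" ++ m)
            (f ++ "(.*?)\\$_" ++ m ++ "\\['(.*?)'\\]", "possible umsafe unserialize")) d)
      PySem.Dict.empty
      = methods.foldl (fun d m => d.insert (pvKey m) (pvVal m)) PySem.Dict.empty := by
    apply PySem.List.foldl_congr_mem
    intro d m _
    exact pv_inner_collapse d m
  rw [houter, pv_loop_items, pv_ofList_items]
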